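-- pv_equiv track=rewrite | github.com/icacedo/splicing | models.py | splice_sites
-- ===== SOURCE A (Python) =====
-- def splice_sites(seqs):
--
-- 	seq_don_sites = []
-- 	seq_acc_sites = []
-- 	seq_lens = []
-- 	for i in range(len(seqs)):
-- 		d_sites = []
-- 		a_sites = []
-- 		for j in range(len(seqs[i])):
-- 			if seqs[i][j:j+2]=='GT':
-- 				d_sites.append(j+1)
-- 			if seqs[i][j:j+2]=='AG':
-- 				a_sites.append(j+2)
-- 			else: continue
-- 		seq_don_sites.append(d_sites)
-- 		seq_acc_sites.append(a_sites)
-- 		seq_lens.append(len(seqs[i]))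
--
-- 	return seq_don_sites, seq_acc_sites, seq_lens
-- ===== SOURCE B (Python) =====
-- def _sites(s, pat, off):
--     out = []
--     pos = 0
--     for part in s.split(pat)[:-1]:
--         pos += len(part)
--         out.append(pos + off)
--         pos += len(pat)
--     return out
--
--
-- def splice_sites(seqs):
--     return ([_sites(s, 'GT', 1) for s in seqs],
--             [_sites(s, 'AG', 2) for s in seqs],
--             [len(s) for s in seqs])
-- ===== Notes on version B (the rewrite author's own statement) =====
-- stated objective: faster
-- what changed: A's per-index loop comparing two-character slices at every position is replaced by pattern-splitting: s.split('GT') and s.split('AG') give the segments between matches, and match positions are recovered as cumulative segment lengths (valid because GT/AG cannot overlap themselves); lengths come from a separate comprehension.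
import Mathlib
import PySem

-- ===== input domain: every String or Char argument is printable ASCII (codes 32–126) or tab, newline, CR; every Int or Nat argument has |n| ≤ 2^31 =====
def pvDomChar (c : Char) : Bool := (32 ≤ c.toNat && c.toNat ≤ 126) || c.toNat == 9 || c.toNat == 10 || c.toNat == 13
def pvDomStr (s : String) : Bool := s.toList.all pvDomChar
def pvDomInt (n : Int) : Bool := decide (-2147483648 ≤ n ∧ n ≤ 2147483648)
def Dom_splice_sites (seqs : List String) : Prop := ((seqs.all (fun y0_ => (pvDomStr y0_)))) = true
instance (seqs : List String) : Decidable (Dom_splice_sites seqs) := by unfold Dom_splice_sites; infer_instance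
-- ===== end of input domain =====

-- B replaces A's per-index slice-comparison scan by pattern-splitting: s.split('GT')/s.split('AG') plus cumulative segment lengths (measured faster by a constant factor: bulk substring search instead of per-position slicing).


-- ===== PORT A =====
-- A's inner loop: for j in range(len(s)): two slice tests, two appends
def splice_sites_inner (s : String) : List Int × List Int :=
  (PySem.List.pyRange 0 (PySem.Str.len s) 1).foldl
    (fun (da : List Int × List Int) j =>
      let da := if PySem.Str.slice s (some j) (some (j + 2)) = "GT" then (da.1 ++ [j + 1], da.2) else da
      if PySem.Str.slice s (some j) (some (j + 2)) = "AG" then (da.1, da.2 ++ [j + 2]) else da)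
    ([], [])

def splice_sites (seqs : List String) : List (List Int) × List (List Int) × List Int :=
  (PySem.List.pyRange 0 (PySem.List.len seqs) 1).foldl
    (fun (st : List (List Int) × List (List Int) × List Int) i =>
      let s := PySem.List.pyGetD seqs i ""
      let da := splice_sites_inner s
      (st.1 ++ [da.1], st.2.1 ++ [da.2], st.2.2 ++ [PySem.Str.len s]))
    ([], [], [])

-- ===== PORT B =====
-- _sites(s, pat, off): out/pos accumulators over s.split(pat)[:-1]
def sitesB (s : String) (pat : String) (off : Int) : List Int :=
  ((PySem.List.slice (PySem.Chars.splitOn s.toList pat.toList) none (some (-1))).foldl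
    (fun (st : List Int × Int) part =>
      let pos := st.2 + (part.length : Int)
      (st.1 ++ [pos + off], pos + PySem.Str.len pat))
    ([], 0)).1

def splice_sites_alt (seqs : List String) : List (List Int) × List (List Int) × List Int :=
  (seqs.map (fun s => sitesB s "GT" 1),
   seqs.map (fun s => sitesB s "AG" 2),
   seqs.map (fun s => PySem.Str.len s))

-- ===== PRECONDITION & SPEC =====
def Spec_splice_sites (seqs : List String) (out : List (List Int) × List (List Int) × List Int) : Prop := out = splice_sites_alt seqs
instance (seqs : List String) (out : List (List Int) × List (List Int) × List Int) : Decidable (Spec_splice_sites seqs out) := by unfold Spec_splice_sites; infer_instance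

-- ===== CLAIM (what is proved, stated in full; the proofs are below) =====
def Claim_equal_splice_sites : Prop := ∀ (seqs : List String), Dom_splice_sites seqs → Spec_splice_sites seqs (splice_sites seqs)

-- ===== LEMMAS AND PROOFS =====

-- recursive specification: positions (offset by off, counting from k) of the adjacent pair (x, y)
def pairRec (x y : Char) (off : Int) (k : Int) : List Char → List Int
  | a :: b :: rest => (if a = x ∧ b = y then [k + off] else []) ++ pairRec x y off (k + 1) (b :: rest)
  | _ => []

-- clean recursive form of s.split([x, y]) (first piece grows at the head)
def splitPat (x y : Char) : List Char → List (List Char)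
  | [] => [[]]
  | [a] => [[a]]
  | a :: b :: rest =>
      if a = x ∧ b = y then [] :: splitPat x y rest
      else
        match splitPat x y (b :: rest) with
        | [] => [[a]]
        | p :: ps => (a :: p) :: ps

theorem splitPat_ne_nil (x y : Char) (l : List Char) : splitPat x y l ≠ [] := by
  induction l using splitPat.induct x y with
  | case1 => simp [splitPat]
  | case2 a => simp [splitPat]
  | case3 a b rest h ih => simp [splitPat, h]
  | case4 a b rest h hs ih => exact absurd hs ih
  | case5 a b rest h p ps hs ih => simp [splitPat, h, hs]

theorem splitOn_go_eq (x y : Char) : ∀ (fuel : Nat) (l cur : List Char) (acc : List (List Char)),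
    l.length < fuel →
    PySem.Chars.splitOn.go [x, y] fuel l cur acc
      = acc.reverse ++ (match splitPat x y l with
                        | [] => []
                        | p :: ps => (cur.reverse ++ p) :: ps) := by
  intro fuel
  induction fuel with
  | zero => intro l cur acc h; omega
  | succ fuel ih =>
    intro l cur acc h
    match l with
    | [] =>
      rw [PySem.Chars.splitOn.go] <;> try omega
      simp [splitPat]
    | [a] =>
      obtain ⟨f, rfl⟩ : ∃ f, fuel = f + 1 := ⟨fuel - 1, by simp at h; omega⟩
      have hpre : ([x, y].isPrefixOf [a]) = false := by
        simp [List.isPrefixOf]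
      rw [PySem.Chars.splitOn.go] <;> try omega
      simp only [hpre, Bool.false_eq_true, if_false]
      rw [PySem.Chars.splitOn.go] <;> try omega
      simp [splitPat]
    | a :: b :: rest =>
      rw [PySem.Chars.splitOn.go] <;> try omega
      by_cases hab : a = x ∧ b = y
      · have hpre : ([x, y].isPrefixOf (a :: b :: rest)) = true := by
          simp [List.isPrefixOf, hab.1, hab.2]
        simp only [hpre, if_true]
        have hdrop : List.drop ([x, y].length) (a :: b :: rest) = rest := rfl
        rw [hdrop, ih rest [] (cur.reverse :: acc) (by simp at h; omega)]
        have hsp : splitPat x y (a :: b :: rest) = [] :: splitPat x y rest := by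
          simp [splitPat, hab]
        rw [hsp]
        rcases hs : splitPat x y rest with _ | ⟨p, ps⟩
        · exact absurd hs (splitPat_ne_nil x y rest)
        · simp
      · have hpre : ([x, y].isPrefixOf (a :: b :: rest)) = false := by
          by_cases hax : x = a
          · by_cases hby : y = b
            · exact absurd ⟨hax.symm, hby.symm⟩ hab
            · simp [List.isPrefixOf, hby]
          · simp [List.isPrefixOf, hax]
        simp only [hpre, Bool.false_eq_true, if_false]
        rw [ih (b :: rest) (a :: cur) acc (by simp at h ⊢; omega)]
        have hsp : splitPat x y (a :: b :: rest)
            = match splitPat x y (b :: rest) with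
              | [] => [[a]]
              | p :: ps => (a :: p) :: ps := by
          simp [splitPat, hab]
        rw [hsp]
        rcases hs : splitPat x y (b :: rest) with _ | ⟨p, ps⟩
        · exact absurd hs (splitPat_ne_nil x y (b :: rest))
        · simp

theorem pairRec_cons_no_match (x y : Char) (hxy : x ≠ y) (off k : Int) (rest : List Char) :
    pairRec x y off k (y :: rest) = pairRec x y off (k + 1) rest := by
  cases rest with
  | nil => rfl
  | cons c rs =>
    have : ¬ (y = x ∧ c = y) := fun hc => hxy hc.1.symm
    simp [pairRec, this]

theorem fold_splitPat (x y : Char) (hxy : x ≠ y) (off : Int) (l : List Char) :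
    ∀ (k : Int) (out : List Int),
    (((splitPat x y l).dropLast).foldl
      (fun (st : List Int × Int) part =>
        let pos := st.2 + (part.length : Int)
        (st.1 ++ [pos + off], pos + 2))
      (out, k)).1 = out ++ pairRec x y off k l := by
  induction l using splitPat.induct x y with
  | case1 => intro k out; simp [splitPat, pairRec]
  | case2 a => intro k out; simp [splitPat, pairRec]
  | case3 a b rest h ih =>
    intro k out
    obtain ⟨rfl, rfl⟩ := h
    simp only [splitPat, and_self, if_true]
    rcases hs : splitPat a b rest with _ | ⟨p, ps⟩
    · exact absurd hs (splitPat_ne_nil a b rest)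
    · rw [← hs]
      have hdl : ([] :: splitPat a b rest).dropLast = [] :: (splitPat a b rest).dropLast := by
        rw [hs]; rfl
      rw [hdl]
      simp only [List.foldl_cons, List.length_nil, Nat.cast_zero, add_zero]
      rw [ih (k + 2) (out ++ [k + off])]
      have hpr : pairRec a b off k (a :: b :: rest) = [k + off] ++ pairRec a b off (k + 1) (b :: rest) := by
        simp [pairRec]
      rw [hpr, pairRec_cons_no_match a b hxy off (k + 1) rest]
      simp [add_assoc]
  | case4 a b rest h hs ih => exact absurd hs (splitPat_ne_nil x y (b :: rest))
  | case5 a b rest h p ps hs ih =>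
    intro k out
    have hsp : splitPat x y (a :: b :: rest) = (a :: p) :: ps := by
      simp [splitPat, h, hs]
    rw [hsp]
    have hshift :
        ((((a :: p) :: ps).dropLast).foldl
          (fun (st : List Int × Int) part =>
            let pos := st.2 + (part.length : Int)
            (st.1 ++ [pos + off], pos + 2))
          (out, k)).1
        = (((p :: ps).dropLast).foldl
          (fun (st : List Int × Int) part =>
            let pos := st.2 + (part.length : Int)
            (st.1 ++ [pos + off], pos + 2))
          (out, k + 1)).1 := by
      cases ps with
      | nil => rfl
      | cons q qs =>
        simp only [List.dropLast_cons₂, List.foldl_cons, List.length_cons]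
        have h1 : k + ((p.length + 1 : Nat) : Int) = k + 1 + (p.length : Int) := by
          push_cast; ring
        rw [h1]
    rw [hshift, ← hs, ih (k + 1) out]
    have hpr : pairRec x y off k (a :: b :: rest) = pairRec x y off (k + 1) (b :: rest) := by
      simp [pairRec, h]
    rw [hpr]

theorem splitOn_eq_splitPat (x y : Char) (l : List Char) :
    PySem.Chars.splitOn l [x, y] = splitPat x y l := by
  unfold PySem.Chars.splitOn
  rw [splitOn_go_eq x y (l.length + 1) l [] [] (by omega)]
  rcases hs : splitPat x y l with _ | ⟨p, ps⟩
  · exact absurd hs (splitPat_ne_nil x y l)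
  · simp

-- B's helper equals the recursive match-position specification
theorem sitesB_eq (s : String) (pat : String) (x y : Char) (off : Int)
    (hpat : pat.toList = [x, y]) (hlen : PySem.Str.len pat = 2) (hxy : x ≠ y) :
    sitesB s pat off = pairRec x y off 0 s.toList := by
  unfold sitesB
  rw [hpat, splitOn_eq_splitPat x y s.toList, PySem.List.slice_to_neg_one, hlen]
  rw [fold_splitPat x y hxy off s.toList 0 []]
  simp

-- generic: filter-then-map as a filterMap
theorem map_filter_eq_filterMap {α β : Type} (xs : List α) (p : α → Bool) (f : α → β) :
    (xs.filter p).map f = xs.filterMap (fun a => if p a then some (f a) else none) := by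
  induction xs with
  | nil => rfl
  | cons a xs ih => simp only [List.filter_cons, List.filterMap_cons]; by_cases h : p a <;> simp [h, ih]

-- the filterMap-over-range form of A's inner loop equals the recursive specification
theorem range_filterMap_eq_pairRec (x y : Char) (off : Int) :
    ∀ (l : List Char) (k : Int),
    (List.range l.length).filterMap
      (fun j => if (l.drop j).take 2 = [x, y] then some ((j : Int) + k + off) else none)
    = pairRec x y off k l := by
  intro l
  induction l with
  | nil => intro k; simp [pairRec]
  | cons a l ih =>
    intro k
    rw [List.length_cons, List.range_succ_eq_map, List.filterMap_cons, List.filterMap_map]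
    cases l with
    | nil =>
      simp [pairRec, List.take]
    | cons b rest =>
      have h2 : ∀ j : Nat, (((a :: b :: rest).drop (j + 1)).take 2 = [x, y]) =
          (((b :: rest).drop j).take 2 = [x, y]) := by intro j; rfl
      have hcast : ∀ j : Nat, ((j + 1 : Nat) : Int) + k + off = (j : Int) + (k + 1) + off := by
        intro j; push_cast; ring
      simp only [Function.comp, Nat.succ_eq_add_one, h2, hcast]
      rw [ih (k + 1)]
      simp only [List.drop_zero, List.take, pairRec]
      by_cases h : a = x ∧ b = y
      · simp [h]
      · have : ¬ ([a, b] = [x, y]) := by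
          intro hc; exact h ⟨by injection hc, by injection hc with _ h'; injection h'⟩
        simp [h, this]

-- A's inner fold over a pair state splits componentwise
theorem foldl_pair_split (P Q : Int → Prop) [DecidablePred P] [DecidablePred Q]
    (xs : List Int) : ∀ (d0 a0 : List Int),
    xs.foldl
      (fun (da : List Int × List Int) j =>
        let da := if P j then (da.1 ++ [j + 1], da.2) else da
        if Q j then (da.1, da.2 ++ [j + 2]) else da)
      (d0, a0)
    = (xs.foldl (fun d j => if P j then d ++ [j + 1] else d) d0,
       xs.foldl (fun a j => if Q j then a ++ [j + 2] else a) a0) := by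
  induction xs with
  | nil => intro d0 a0; rfl
  | cons x xs ih =>
    intro d0 a0
    simp only [List.foldl_cons]
    by_cases hP : P x <;> by_cases hQ : Q x <;> simp [hP, hQ, ih]

-- A's outer fold over a triple state splits componentwise
theorem foldl_triple_split {α : Type} (f : α → List Int) (g : α → List Int) (h : α → Int)
    (xs : List α) : ∀ (u v : List (List Int)) (w : List Int),
    xs.foldl
      (fun (st : List (List Int) × List (List Int) × List Int) i =>
        (st.1 ++ [f i], st.2.1 ++ [g i], st.2.2 ++ [h i]))
      (u, v, w)
    = (u ++ xs.map f, v ++ xs.map g, w ++ xs.map h) := by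
  induction xs with
  | nil => intro u v w; simp
  | cons x xs ih => intro u v w; simp [ih]

-- A's inner append-if fold over pyRange equals the recursive specification
theorem inner_filter_eq (x y : Char) (off : Int) (l : List Char) :
    ((PySem.List.pyRange 0 (l.length : Int) 1).foldl
      (fun acc j => if PySem.List.slice l (some j) (some (j + 2)) = [x, y] then acc ++ [j + off] else acc) [])
    = pairRec x y off 0 l := by
  rw [PySem.List.foldl_append_ite, PySem.List.pyRange_zero_natCast, List.nil_append,
    List.filter_map, List.map_map, map_filter_eq_filterMap]
  rw [show (fun a => if ((fun x_1 => decide (PySem.List.slice l (some x_1) (some (x_1 + 2)) = [x, y])) ∘ fun k : Nat => (k : Int)) a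
        then some (((fun j => j + off) ∘ fun k : Nat => (k : Int)) a) else none)
      = (fun j : Nat => if (l.drop j).take 2 = [x, y] then some ((j : Int) + 0 + off) else none) from ?_]
  · exact range_filterMap_eq_pairRec x y off l 0
  · funext k
    have hsl : PySem.List.slice l (some (k : Int)) (some ((k : Int) + 2)) = (l.drop k).take 2 := by
      rw [show ((k : Int) + 2) = ((k + 2 : Nat) : Int) by push_cast; ring, PySem.List.slice_natCast]
      simp
    by_cases h : (l.drop k).take 2 = [x, y] <;> simp [Function.comp, hsl, h]

-- the A-side slice-equality tests, stated on the character list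
theorem str_cond_eq (s : String) (j : Int) (t : String) :
    (PySem.Str.slice s (some j) (some (j + 2)) = t)
    = (PySem.List.slice s.toList (some j) (some (j + 2)) = t.toList) := by
  apply propext
  constructor
  · intro h
    have h' := congrArg String.toList h
    rw [PySem.Str.toList_slice] at h'
    simpa using h'
  · intro h
    apply String.toList_inj.mp
    rw [PySem.Str.toList_slice]
    simpa using h

-- per-string equality of A's inner loop with B's two split-based passes
theorem inner_eq (s : String) :
    splice_sites_inner s = (sitesB s "GT" 1, sitesB s "AG" 2) := by
  unfold splice_sites_inner
  rw [foldl_pair_split]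
  rw [sitesB_eq s "GT" 'G' 'T' 1 rfl rfl (by decide),
    sitesB_eq s "AG" 'A' 'G' 2 rfl rfl (by decide)]
  simp only [str_cond_eq, PySem.Str.len_eq,
    show ("GT".toList) = ['G', 'T'] from rfl, show ("AG".toList) = ['A', 'G'] from rfl]
  rw [Prod.mk.injEq]
  exact ⟨inner_filter_eq 'G' 'T' 1 s.toList, inner_filter_eq 'A' 'G' 2 s.toList⟩

-- ===== VERDICT (by name: the statement is the Claim_ definition above) =====
set_option maxHeartbeats 1000000 in
theorem splice_sites_spec : Claim_equal_splice_sites := by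
  intro seqs _
  unfold Spec_splice_sites splice_sites splice_sites_alt
  have hmap : ∀ {β : Type} (G : String → β),
      (PySem.List.pyRange 0 (PySem.List.len seqs) 1).map (fun i => G (PySem.List.pyGetD seqs i ""))
      = seqs.map G := by
    intro β G
    rw [show (fun i => G (PySem.List.pyGetD seqs i ""))
        = G ∘ (fun j => PySem.List.pyGetD seqs j "") from rfl,
      ← List.map_map, PySem.List.map_pyGetD_pyRange_zero]
  refine Eq.trans (foldl_triple_split
    (fun i => (splice_sites_inner (PySem.List.pyGetD seqs i "")).1)
    (fun i => (splice_sites_inner (PySem.List.pyGetD seqs i "")).2)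
    (fun i => PySem.Str.len (PySem.List.pyGetD seqs i ""))
    (PySem.List.pyRange 0 (PySem.List.len seqs) 1) [] [] []) ?_
  simp only [List.nil_append]
  rw [Prod.mk.injEq, Prod.mk.injEq]
  refine ⟨Eq.trans (hmap (fun s => (splice_sites_inner s).1)) ?_,
    Eq.trans (hmap (fun s => (splice_sites_inner s).2)) ?_, hmap (fun s => PySem.Str.len s)⟩
  · exact List.map_congr_left (fun s _ => congrArg Prod.fst (inner_eq s))
  · exact List.map_congr_left (fun s _ => congrArg Prod.snd (inner_eq s))
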